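-- pv_equiv track=rewrite | github.com/fifajan/py-stuff | pages.py | div_by_4
-- ===== SOURCE A (Python) =====
-- def div_by_4(total):
--     result = []
--     of_4 = 1
--     pages_4 = []
--     for page_num in range(1, total + 1):
--         if of_4 > 4:
--             of_4 = 1
--             result.append(pages_4)
--             pages_4 = []
--
--         pages_4.append(page_num)
--         of_4 += 1
--
--     if len(pages_4) < 4:
--         left = 4 - len(pages_4)
--         pages_4 += [None] * left
--
--     result.append(pages_4)
--
--     return result
-- ===== SOURCE B (Python) =====
-- def div_by_4(total):
--     pages = list(range(1, total + 1))
--     result = []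
--     i = 0
--     while True:
--         head = pages[i:i + 4]
--         i += 4
--         result.append(head + [None] * (4 - len(head)))
--         if i >= len(pages):
--             return result
-- ===== Notes on version B (the rewrite author's own statement) =====
-- stated objective: simpler
-- what changed: Replaced A's per-element loop with a flush counter and a separate final-padding branch by a block-at-a-time loop that slices four pages per iteration and pads every block arithmetically, which is a no-op on all but the last block and also covers the empty-range case without special handling.
import Mathlib
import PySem

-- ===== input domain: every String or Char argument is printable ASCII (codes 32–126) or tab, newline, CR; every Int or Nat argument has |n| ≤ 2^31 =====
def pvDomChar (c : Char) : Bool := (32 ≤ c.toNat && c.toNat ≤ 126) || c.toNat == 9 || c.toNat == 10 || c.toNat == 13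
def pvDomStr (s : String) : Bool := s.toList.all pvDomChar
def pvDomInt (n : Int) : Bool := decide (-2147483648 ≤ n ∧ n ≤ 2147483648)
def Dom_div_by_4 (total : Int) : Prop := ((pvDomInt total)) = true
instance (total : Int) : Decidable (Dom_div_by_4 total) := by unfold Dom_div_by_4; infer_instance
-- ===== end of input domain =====

-- B replaces A's per-element counter loop by a slice-driven while loop taking 4 pages at a time,
-- padding each block arithmetically (a no-op except on the last); objective: simpler.


-- ===== PORT A =====
-- loop body of A's for-loop: flush the current block when the counter exceeds 4, then append
def fA (s : List (List (Option Int)) × Int × List (Option Int)) (page_num : Int) :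
    List (List (Option Int)) × Int × List (Option Int) :=
  let t := if s.2.1 > 4 then (s.1 ++ [s.2.2], (1 : Int), ([] : List (Option Int))) else s
  (t.1, t.2.1 + 1, t.2.2 ++ [some page_num])

def div_by_4 (total : Int) : List (List (Option Int)) :=
  let s := (PySem.List.pyRange 1 (total + 1) 1).foldl fA ([], 1, [])
  let pages_4 :=
    if s.2.2.length < 4 then s.2.2 ++ List.replicate (4 - s.2.2.length) none else s.2.2
  s.1 ++ [pages_4]

-- ===== PORT B =====
-- B's while-loop: pages[i:i+4] via a PySem slice, i advancing by 4; [None]*(4-len(head)) is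
-- the clamped replicate (Python's list-repeat with a nonpositive count is empty, as is replicate)
def chunkPadB (pages : List Int) (i : Nat) : List (List (Option Int)) :=
  let head := PySem.List.slice pages (some (i : Int)) (some ((i : Int) + 4))
  let grp := head.map (fun n => some n) ++ List.replicate (4 - head.length) (none : Option Int)
  if h : (i : Int) + 4 ≥ (pages.length : Int) then [grp]
  else grp :: chunkPadB pages (i + 4)
termination_by pages.length - i
decreasing_by
  simp only [not_le] at h
  omega

def div_by_4_alt (total : Int) : List (List (Option Int)) :=
  chunkPadB (PySem.List.pyRange 1 (total + 1) 1) 0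

-- ===== PRECONDITION & SPEC =====
def Spec_div_by_4 (total : Int) (out : List (List (Option Int))) : Prop := out = div_by_4_alt total
instance (total : Int) (out : List (List (Option Int))) : Decidable (Spec_div_by_4 total out) := by unfold Spec_div_by_4; infer_instance

-- ===== CLAIM (what is proved, stated in full; the proofs are below) =====
def Claim_equal_div_by_4 : Prop := ∀ (total : Int), Dom_div_by_4 total → Spec_div_by_4 total (div_by_4 total)

-- ===== LEMMAS AND PROOFS =====

-- proof-side restatement of B's loop on the suffix pages.drop i
def chunkAux (l : List Int) : List (List (Option Int)) :=
  if l.length ≤ 4 then [l.map (fun n => some n) ++ List.replicate (4 - l.length) none]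
  else (l.take 4).map (fun n => some n) :: chunkAux (l.drop 4)
termination_by l.length
decreasing_by simp; omega

lemma slice_i_i4 (pages : List Int) (i : Nat) :
    PySem.List.slice pages (some (i : Int)) (some ((i : Int) + 4)) = (pages.drop i).take 4 := by
  have := PySem.List.slice_natCast_add pages i 4
  simpa using this

lemma chunkPadB_eq_chunkAux : ∀ (n : Nat) (pages : List Int) (i : Nat), pages.length - i = n →
    chunkPadB pages i = chunkAux (pages.drop i) := by
  intro n
  induction n using Nat.strong_induction_on with
  | _ n ih =>
    intro pages i hn
    rw [chunkPadB, slice_i_i4]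
    by_cases h : (i : Int) + 4 ≥ (pages.length : Int)
    · have hlen : (pages.drop i).length ≤ 4 := by simp; omega
      have htk : (pages.drop i).take 4 = pages.drop i := List.take_of_length_le hlen
      rw [chunkAux, if_pos hlen]
      simp [h, htk]
    · have hlen : ¬ (pages.drop i).length ≤ 4 := by simp; omega
      rw [dif_neg h, chunkAux, if_neg hlen,
        ih (pages.length - (i + 4)) (by omega) pages (i + 4) rfl]
      have : (pages.drop i).drop 4 = pages.drop (i + 4) := by
        rw [List.drop_drop]
      simp only [List.length_take, this]
      congr 1
      have hz : 4 - min 4 (pages.length - i) = 0 := by omega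
      simp [hz]

-- A's final padding-and-append step, as a function of the fold state
def finishA (s : List (List (Option Int)) × Int × List (Option Int)) : List (List (Option Int)) :=
  s.1 ++ [if s.2.2.length < 4 then s.2.2 ++ List.replicate (4 - s.2.2.length) none else s.2.2]

lemma foldA_small (l : List Int) : ∀ (p : List (Option Int)) (result : List (List (Option Int))),
    p.length + l.length ≤ 4 →
    l.foldl fA (result, (p.length : Int) + 1, p)
      = (result, ((p.length + l.length : Nat) : Int) + 1, p ++ l.map (fun n => some n)) := by
  induction l with
  | nil => intro p result _; simp
  | cons x xs ih =>
    intro p result h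
    have hp : ¬ ((p.length : Int) + 1 > 4) := by
      simp only [List.length_cons] at h; omega
    have hstep : fA (result, (p.length : Int) + 1, p) x
        = (result, ((p ++ [some x]).length : Int) + 1, p ++ [some x]) := by
      simp [fA, hp]
      try push_cast
      try ring
    simp only [List.length_cons] at h
    have hle' : (p ++ [some x]).length + xs.length ≤ 4 := by
      simp only [List.length_append, List.length_cons, List.length_nil]; omega
    rw [List.foldl_cons, hstep, ih (p ++ [some x]) result hle']
    simp
    omega

lemma chunkAux_small (l : List Int) (h : l.length ≤ 4) :
    chunkAux l = [l.map (fun n => some n) ++ List.replicate (4 - l.length) none] := by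
  rw [chunkAux, if_pos h]

lemma main_lemma : ∀ (n : Nat) (l : List Int), l.length = n →
    ∀ (result : List (List (Option Int))),
    finishA (l.foldl fA (result, 1, [])) = result ++ chunkAux l := by
  intro n
  induction n using Nat.strong_induction_on with
  | _ n ih =>
    intro l hlen result
    by_cases hle : l.length ≤ 4
    · have h0 := foldA_small l [] result (by simpa using hle)
      simp only [List.length_nil, Int.natCast_zero, zero_add, List.nil_append] at h0
      rw [h0, chunkAux_small l hle]
      by_cases h4 : l.length < 4
      · simp [finishA, h4]
      · have : l.length = 4 := by omega
        simp [finishA, this]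
    · -- l.length ≥ 5 : process the first full block, flush it on the 5th element
      have hsplit : l = l.take 4 ++ l.drop 4 := (List.take_append_drop 4 l).symm
      have hdrop : l.drop 4 ≠ [] := by
        intro hc
        have := List.drop_eq_nil_iff.mp hc
        omega
      obtain ⟨x, rest, hx⟩ := List.exists_cons_of_ne_nil hdrop
      have htake : (l.take 4).length = 4 := by
        rw [List.length_take]; omega
      have h0 := foldA_small (l.take 4) [] result (by simp [htake])
      simp only [List.length_nil, Int.natCast_zero, zero_add, List.nil_append, htake] at h0
      have hfoldsplit : l.foldl fA (result, 1, []) =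
          (l.drop 4).foldl fA (result ++ [(l.take 4).map (fun n => some n)], 1, []) := by
        conv_lhs => rw [hsplit]
        rw [List.foldl_append, h0, hx, List.foldl_cons, List.foldl_cons]
        congr 1
        try simp [fA]
        try norm_num
      rw [hfoldsplit,
        ih (l.drop 4).length (by rw [List.length_drop]; omega) (l.drop 4) rfl]
      -- unfold one step of chunkAux on the long list
      conv_rhs => rw [chunkAux, if_neg (by omega : ¬ l.length ≤ 4)]
      simp

-- ===== VERDICT (by name: the statement is the Claim_ definition above) =====
theorem div_by_4_spec : Claim_equal_div_by_4 := by
  intro total _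
  show div_by_4 total = div_by_4_alt total
  unfold div_by_4 div_by_4_alt
  rw [chunkPadB_eq_chunkAux ((PySem.List.pyRange 1 (total + 1) 1).length - 0)
    (PySem.List.pyRange 1 (total + 1) 1) 0 rfl, List.drop_zero]
  have := main_lemma (PySem.List.pyRange 1 (total + 1) 1).length
    (PySem.List.pyRange 1 (total + 1) 1) rfl []
  simpa [finishA] using this
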